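-- pv_equiv track=rewrite | github.com/Xzr-0417/attack-vector-dataset | PHP-injection/Polymorphic/Polymorphic9.py | case_convert
-- ===== SOURCE A (Python) =====
-- def case_convert(line):
--     converted = []
--     letter_count = 0
--     for char in line:
--         if char.isalpha():
--             letter_count += 1
--             converted.append(char.swapcase() if letter_count % 2 == 1 else char)
--         else:
--             converted.append(char)
--     return ''.join(converted)
-- ===== SOURCE B (Python) =====
-- def case_convert(line):
--     chars = list(line)
--     positions = [i for i, c in enumerate(line) if c.isalpha()]
--     for i in positions[::2]:
--         chars[i] = chars[i].swapcase()
--     return ''.join(chars)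
-- ===== Notes on version B (the rewrite author's own statement) =====
-- stated objective: alternative
-- what changed: Replaces A's single counter-driven pass (letter_count parity decided per character) with a two-phase approach: first build the index table of all alphabetic positions, then swapcase in place at every other entry of that table (positions[::2]).
import Mathlib
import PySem

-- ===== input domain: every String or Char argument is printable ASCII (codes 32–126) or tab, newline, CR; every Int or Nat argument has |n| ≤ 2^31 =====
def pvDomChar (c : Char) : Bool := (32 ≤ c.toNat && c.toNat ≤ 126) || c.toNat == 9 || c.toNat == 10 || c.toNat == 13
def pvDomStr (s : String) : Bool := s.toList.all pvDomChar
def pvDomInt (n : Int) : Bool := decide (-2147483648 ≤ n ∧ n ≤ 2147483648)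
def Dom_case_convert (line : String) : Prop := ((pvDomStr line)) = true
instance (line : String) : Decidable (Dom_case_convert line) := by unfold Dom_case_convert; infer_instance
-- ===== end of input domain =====

-- B rebuilds the result in two phases (index table of alphabetic positions, then a strided
-- in-place pass over positions[::2]) instead of A's single counter-driven pass; alternative, same cost.

-- char.swapcase() for one ASCII character (shared by both ports)
def pySwapcase (c : Char) : Char :=
  if PySem.Chars.isupper c then PySem.Chars.lowerChar c
  else if PySem.Chars.islower c then PySem.Chars.upperChar c
  else c

-- ===== PORT A =====
def case_convert (line : String) : String :=
  let r := line.toList.foldl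
    (fun (st : List Char × Int) ch =>
      if PySem.Chars.isalpha ch then
        (st.1 ++ [if PySem.Int.mod (st.2 + 1) 2 == 1 then pySwapcase ch else ch], st.2 + 1)
      else
        (st.1 ++ [ch], st.2))
    ([], 0)
  String.ofList r.1

-- ===== PORT B =====
def case_convert_alt (line : String) : String :=
  let chars := line.toList
  let positions := (PySem.List.enumerate line.toList 0).filterMap
    (fun ic => if PySem.Chars.isalpha ic.2 then some ic.1 else none)
  let sel := (PySem.List.slice? positions none none 2).getD []   -- step 2 ≠ 0, so always some
  let chars := sel.foldl
    (fun cs i =>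
      match PySem.List.pyGet? cs i with   -- chars[i]; in-range here, none = IndexError guard
      | some ch => cs.set i.toNat (pySwapcase ch)
      | none => cs)
    chars
  String.ofList chars

-- ===== PRECONDITION & SPEC =====
def Spec_case_convert (line : String) (out : String) : Prop := out = case_convert_alt line
instance (line : String) (out : String) : Decidable (Spec_case_convert line out) := by unfold Spec_case_convert; infer_instance

-- ===== CLAIM (what is proved, stated in full; the proofs are below) =====
def Claim_equal_case_convert : Prop := ∀ (line : String), Dom_case_convert line → Spec_case_convert line (case_convert line)

-- ===== LEMMAS AND PROOFS =====

-- reference recursion: swapcase every odd-positioned letter; b = "next letter gets swapped"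
def parityMap : List Char → Bool → List Char
  | [], _ => []
  | c :: cs, b =>
    if PySem.Chars.isalpha c then (if b then pySwapcase c else c) :: parityMap cs (!b)
    else c :: parityMap cs b

-- every other element, starting with the first (b = true: keep head)
def everyOther {α : Type} (b : Bool) : List α → List α
  | [] => []
  | x :: xs => if b then x :: everyOther false xs else everyOther true xs

theorem fmod2_flip (n : Int) : (((n + 2).fmod 2 == 1) : Bool) = !((n + 1).fmod 2 == 1) := by
  rw [Int.fmod_eq_emod_of_nonneg _ (by norm_num), Int.fmod_eq_emod_of_nonneg _ (by norm_num)]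
  by_cases hc : (n + 1) % 2 = 1
  · have h2 : (n + 2) % 2 = 0 := by omega
    simp [hc, h2]
  · have h1 : (n + 1) % 2 = 0 := by omega
    have h2 : (n + 2) % 2 = 1 := by omega
    simp [h1, h2]

theorem foldA (cs : List Char) : ∀ (acc : List Char) (n : Int),
    (cs.foldl
      (fun (st : List Char × Int) ch =>
        if PySem.Chars.isalpha ch then
          (st.1 ++ [if PySem.Int.mod (st.2 + 1) 2 == 1 then pySwapcase ch else ch], st.2 + 1)
        else
          (st.1 ++ [ch], st.2)) (acc, n)).1
    = acc ++ parityMap cs (PySem.Int.mod (n + 1) 2 == 1) := by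
  induction cs with
  | nil => intro acc n; simp [parityMap]
  | cons c cs ih =>
    intro acc n
    by_cases h : PySem.Chars.isalpha c = true
    · simp only [List.foldl_cons, h, if_pos]
      rw [ih _ (n + 1), parityMap]
      simp only [h, if_pos, List.append_assoc, List.singleton_append]
      simp only [PySem.Int.mod]
      rw [show n + 1 + 1 = n + 2 by ring, fmod2_flip n]
    · simp only [List.foldl_cons, h, Bool.false_eq_true, if_false]
      rw [ih _ n, parityMap]
      simp [h]

theorem everyOther_map {α β : Type} (g : α → β) (l : List α) : ∀ b,
    everyOther b (l.map g) = (everyOther b l).map g := by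
  induction l with
  | nil => intro b; simp [everyOther]
  | cons x xs ih => intro b; cases b <;> simp [everyOther, ih]

theorem everyOther_subset {α : Type} (l : List α) : ∀ b x, x ∈ everyOther b l → x ∈ l := by
  induction l with
  | nil => intro b x h; simp [everyOther] at h
  | cons y ys ih =>
    intro b x h
    cases b <;> simp only [everyOther, if_pos, Bool.false_eq_true, if_false] at h
    · exact List.mem_cons_of_mem _ (ih _ _ h)
    · rcases List.mem_cons.mp h with h | h
      · simp [h]
      · exact List.mem_cons_of_mem _ (ih _ _ h)

-- the positions comprehension, with enumerate offset s
def posF (cs : List Char) (s : Int) : List Int :=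
  (PySem.List.enumerate cs s).filterMap (fun ic => if PySem.Chars.isalpha ic.2 then some ic.1 else none)

theorem posF_cons (c : Char) (cs : List Char) (s : Int) :
    posF (c :: cs) s = if PySem.Chars.isalpha c then s :: posF cs (s + 1) else posF cs (s + 1) := by
  by_cases h : PySem.Chars.isalpha c = true <;>
    simp [posF, PySem.List.enumerate_cons, h]

theorem posF_shift (cs : List Char) : ∀ s : Int, posF cs (s + 1) = (posF cs s).map (· + 1) := by
  induction cs with
  | nil => intro s; simp [posF, PySem.List.enumerate_nil]
  | cons c cs ih =>
    intro s
    rw [posF_cons, posF_cons, ih (s + 1)]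
    split <;> simp [ih s]

theorem posF_nonneg (cs : List Char) : ∀ (s : Int) (i : Int), i ∈ posF cs s → s ≤ i := by
  induction cs with
  | nil => intro s i h; simp [posF, PySem.List.enumerate_nil] at h
  | cons c cs ih =>
    intro s i h
    rw [posF_cons] at h
    split at h
    · rcases List.mem_cons.mp h with h | h
      · omega
      · have := ih (s + 1) i h; omega
    · have := ih (s + 1) i h; omega

-- one step of B's update loop (chars[i] = chars[i].swapcase())
def swapStep (cs : List Char) (i : Int) : List Char :=
  match PySem.List.pyGet? cs i with
  | some ch => cs.set i.toNat (pySwapcase ch)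
  | none => cs

def swapLoop (is : List Int) (cs : List Char) : List Char := is.foldl swapStep cs

theorem pyGet?_cons_succ (c : Char) (cs : List Char) (i : Int) (hi : 0 ≤ i) :
    PySem.List.pyGet? (c :: cs) (i + 1) = PySem.List.pyGet? cs i := by
  simp only [PySem.List.pyGet?, PySem.List.pyIdx?, List.length_cons]
  rw [if_pos hi, if_pos (show (0:Int) ≤ i + 1 by omega)]
  by_cases h : i < (cs.length : Int)
  · rw [if_pos (by push_cast; omega), if_pos h]
    simp [show (i + 1).toNat = i.toNat + 1 by omega]
  · rw [if_neg (by push_cast; omega), if_neg h]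
    rfl

theorem swapStep_zero (c : Char) (cs : List Char) :
    swapStep (c :: cs) 0 = pySwapcase c :: cs := by
  simp [swapStep]

theorem swapStep_succ (c : Char) (cs : List Char) (i : Int) (hi : 0 ≤ i) :
    swapStep (c :: cs) (i + 1) = c :: swapStep cs i := by
  rw [swapStep, swapStep, pyGet?_cons_succ c cs i hi]
  cases h : PySem.List.pyGet? cs i with
  | none => rfl
  | some ch => simp [show (i + 1).toNat = i.toNat + 1 by omega]

theorem swapLoop_shift (is : List Int) : ∀ (c : Char) (cs : List Char), (∀ i ∈ is, 0 ≤ i) →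
    swapLoop (is.map (· + 1)) (c :: cs) = c :: swapLoop is cs := by
  induction is with
  | nil => intro c cs _; simp [swapLoop]
  | cons i is ih =>
    intro c cs hnn
    have hi : (0 : Int) ≤ i := hnn i (List.mem_cons_self ..)
    simp only [List.map_cons, swapLoop, List.foldl_cons]
    rw [swapStep_succ c cs i hi]
    exact ih c _ (fun j hj => hnn j (List.mem_cons_of_mem _ hj))

theorem swapLoop_main (cs : List Char) : ∀ b,
    swapLoop (everyOther b (posF cs 0)) cs = parityMap cs b := by
  induction cs with
  | nil => intro b; simp [posF, PySem.List.enumerate_nil, everyOther, swapLoop, parityMap]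
  | cons c cs ih =>
    intro b
    have hshift : posF cs (0 + 1) = (posF cs 0).map (· + 1) := posF_shift cs 0
    have hnn : ∀ x : Bool, ∀ i ∈ everyOther x (posF cs 0), (0 : Int) ≤ i := fun x i hi =>
      posF_nonneg cs 0 i (everyOther_subset _ x i hi)
    rw [posF_cons]
    by_cases h : PySem.Chars.isalpha c = true
    · rw [if_pos h, hshift]
      cases b with
      | true =>
        rw [show everyOther true ((0:Int) :: (posF cs 0).map (· + 1))
              = 0 :: everyOther false ((posF cs 0).map (· + 1)) from rfl,
            everyOther_map]
        rw [show swapLoop ((0:Int) :: (everyOther false (posF cs 0)).map (· + 1)) (c :: cs)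
              = swapLoop ((everyOther false (posF cs 0)).map (· + 1)) (swapStep (c :: cs) 0) from rfl,
            swapStep_zero, swapLoop_shift _ _ _ (hnn false), ih false]
        simp [parityMap, h]
      | false =>
        rw [show everyOther false ((0:Int) :: (posF cs 0).map (· + 1))
              = everyOther true ((posF cs 0).map (· + 1)) from rfl,
            everyOther_map, swapLoop_shift _ _ _ (hnn true), ih true]
        simp [parityMap, h]
    · rw [if_neg h, hshift, everyOther_map, swapLoop_shift _ _ _ (hnn b), ih b]
      simp [parityMap, h]

-- slice characterization: xs[::2] picks every other element
theorem fmEO {α : Type} (xs : List α) :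
    (List.range ((xs.length + 1) / 2)).filterMap (fun k => xs[2 * k]?) = everyOther true xs := by
  match xs with
  | [] => simp [everyOther]
  | [x] => simp [everyOther, List.range_succ]
  | x :: y :: xs =>
    have ih := fmEO xs
    have hcount : (x :: y :: xs).length + 1 = ((xs.length + 1) / 2 + 1) * 2 + (xs.length + 1) % 2 := by
      simp only [List.length_cons]; omega
    have hc2 : ((x :: y :: xs).length + 1) / 2 = (xs.length + 1) / 2 + 1 := by
      simp only [List.length_cons]; omega
    rw [hc2, List.range_succ_eq_map, List.filterMap_cons, List.filterMap_map]
    simp only [Nat.mul_zero, List.getElem?_cons_zero]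
    show x :: (List.range ((xs.length + 1) / 2)).filterMap
        (fun k => (x :: y :: xs)[2 * (k + 1)]?) = everyOther true (x :: y :: xs)
    have harg : (fun k => (x :: y :: xs)[2 * (k + 1)]?) = (fun k : Nat => xs[2 * k]?) := by
      funext k
      rw [show 2 * (k + 1) = 2 * k + 1 + 1 by ring]
      simp
    rw [harg, ih]
    rfl

theorem slice?_two {α : Type} (xs : List α) :
    PySem.List.slice? xs none none 2 = some (everyOther true xs) := by
  unfold PySem.List.slice?
  rw [if_neg (by norm_num)]
  have hidx : PySem.List.sliceIndices xs.length none none 2 = (0, (xs.length : Int), 2) := by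
    simp [PySem.List.sliceIndices]
  rw [hidx]
  show some (List.filterMap (fun k : Nat => xs[((0 : Int) + 2 * (k : Int)).toNat]?)
      (List.range (if (0 : Int) < 2 then
          (if (0 : Int) < (xs.length : Int) then (((xs.length : Int) - 0 + 2 - 1) / 2).toNat else 0)
        else if (xs.length : Int) < 0 then (((0 : Int) - (xs.length : Int) + -2 - 1) / -2).toNat else 0)))
    = some (everyOther true xs)
  have hcount : (if (0 : Int) < 2 then
          (if (0 : Int) < (xs.length : Int) then (((xs.length : Int) - 0 + 2 - 1) / 2).toNat else 0)
        else if (xs.length : Int) < 0 then (((0 : Int) - (xs.length : Int) + -2 - 1) / -2).toNat else 0)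
      = (xs.length + 1) / 2 := by
    rw [if_pos (by norm_num)]
    split
    · omega
    · omega
  have harg : (fun k : Nat => xs[((0 : Int) + 2 * (k : Int)).toNat]?) = (fun k : Nat => xs[2 * k]?) := by
    funext k
    congr 1
    omega
  rw [hcount, harg, fmEO]

-- ===== VERDICT (by name: the statement is the Claim_ definition above) =====
theorem case_convert_spec : Claim_equal_case_convert := by
  intro line _
  unfold Spec_case_convert case_convert case_convert_alt
  show String.ofList (line.toList.foldl
      (fun (st : List Char × Int) ch =>
        if PySem.Chars.isalpha ch then
          (st.1 ++ [if PySem.Int.mod (st.2 + 1) 2 == 1 then pySwapcase ch else ch], st.2 + 1)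
        else (st.1 ++ [ch], st.2)) ([], 0)).1
    = String.ofList (swapLoop ((PySem.List.slice? (posF line.toList 0) none none 2).getD []) line.toList)
  rw [foldA, slice?_two]
  show String.ofList (parityMap line.toList (PySem.Int.mod (0 + 1) 2 == 1))
      = String.ofList (swapLoop (everyOther true (posF line.toList 0)) line.toList)
  rw [swapLoop_main line.toList true]
  have h1 : (PySem.Int.mod (0 + 1) 2 == 1) = true := by decide
  rw [h1]
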